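-- pv_equiv track=rewrite | github.com/dostiny/algorithms_auto_save | 프로그래머스/unrated/181943. 문자열 겹쳐쓰기/문자열 겹쳐쓰기.py | solution
-- ===== SOURCE A (Python) =====
-- def solution(my_string, overwrite_string, s):
--     answer = ''
--     n = len(overwrite_string)
--     m, j = 0, 0
--     for i in range(len(my_string)):
--         if i == s:
--             m = 1
--
--         if m == 0:
--             answer += my_string[i]
--         elif m == 1:
--             answer += overwrite_string[j]
--             j += 1
--             if j == n:
--                 m = 0
--     return answer
-- ===== SOURCE B (Python) =====
-- def solution(my_string, overwrite_string, s):
--     if s < 0 or s >= len(my_string):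
--         return my_string
--     end = min(s + len(overwrite_string), len(my_string))
--     return my_string[:s] + overwrite_string[:end - s] + my_string[end:]
-- ===== Notes on version B (the rewrite author's own statement) =====
-- stated objective: faster
-- what changed: Replaces A's per-character Python loop with state flags (m, j) by a closed-form three-slice splice my_string[:s] + truncated overwrite + tail (C-level slicing, no per-char interpreter work).
import Mathlib
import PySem

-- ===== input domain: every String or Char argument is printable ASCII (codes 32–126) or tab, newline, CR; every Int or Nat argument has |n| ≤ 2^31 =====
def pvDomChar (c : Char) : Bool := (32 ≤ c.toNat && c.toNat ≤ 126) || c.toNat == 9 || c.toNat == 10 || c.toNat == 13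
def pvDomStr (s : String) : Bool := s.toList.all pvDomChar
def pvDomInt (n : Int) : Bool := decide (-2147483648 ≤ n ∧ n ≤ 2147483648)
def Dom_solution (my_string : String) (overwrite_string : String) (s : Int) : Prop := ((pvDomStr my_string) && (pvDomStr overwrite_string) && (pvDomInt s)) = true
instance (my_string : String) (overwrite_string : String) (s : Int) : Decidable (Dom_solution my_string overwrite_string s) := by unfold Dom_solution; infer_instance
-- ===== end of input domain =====

-- B replaces A's per-character loop with flags by a closed-form three-slice splice (return value only).

-- ===== PORT A =====
-- the for-loop of A: recursion over the remaining characters, carrying the index i and A's state m, j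
def solutionGo (ow : List Char) (n : Nat) : List Char → Nat → Int → Nat → Nat → List Char
  | [], _, _, _, _ => []
  | c :: rest, i, s, m, j =>
    let m1 := if (i : Int) = s then 1 else m
    if m1 = 0 then c :: solutionGo ow n rest (i+1) s m1 j
    else
      let j1 := j + 1
      let m2 := if j1 = n then 0 else m1
      ow.getD j ' ' :: solutionGo ow n rest (i+1) s m2 j1

def solution (my_string : String) (overwrite_string : String) (s : Int) : String :=
  String.ofList (solutionGo overwrite_string.toList overwrite_string.toList.length
              my_string.toList 0 s 0 0)

-- ===== PORT B =====
def solution_alt (my_string : String) (overwrite_string : String) (s : Int) : String :=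
  let len : Int := my_string.toList.length
  if s < 0 ∨ len ≤ s then my_string
  else
    let e : Int := min (s + overwrite_string.toList.length) len
    String.ofList (my_string.toList.take s.toNat
               ++ overwrite_string.toList.take (e - s).toNat
               ++ my_string.toList.drop e.toNat)

-- ===== PRECONDITION & SPEC =====
-- Pre_ excludes exactly the inputs where A raises IndexError: overwrite_string empty with s inside my_string
def Pre_solution (my_string : String) (overwrite_string : String) (s : Int) : Prop :=
  ¬ (0 ≤ s ∧ s < (my_string.toList.length : Int) ∧ overwrite_string.toList = [])
instance (my_string : String) (overwrite_string : String) (s : Int) : Decidable (Pre_solution my_string overwrite_string s) := by unfold Pre_solution; infer_instance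
def pvWitness_solution : String × String × Int := ("hello", "XY", 1)

def Spec_solution (my_string : String) (overwrite_string : String) (s : Int) (out : String) : Prop := out = solution_alt my_string overwrite_string s
instance (my_string : String) (overwrite_string : String) (s : Int) (out : String) : Decidable (Spec_solution my_string overwrite_string s out) := by unfold Spec_solution; infer_instance

-- ===== CLAIM (what is proved, stated in full; the proofs are below) =====
def Claim_equal_solution : Prop := ∀ (my_string : String) (overwrite_string : String) (s : Int), Dom_solution my_string overwrite_string s → Pre_solution my_string overwrite_string s → Spec_solution my_string overwrite_string s (solution my_string overwrite_string s)
-- ===== LEMMAS AND PROOFS =====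

-- if s is never hit from index i on, the loop just copies
theorem go_copy (ow : List Char) (n : Nat) (cs : List Char) (i : Nat) (s : Int) (j : Nat)
    (h : s < (i : Int) ∨ (i : Int) + cs.length ≤ s) :
    solutionGo ow n cs i s 0 j = cs := by
  induction cs generalizing i with
  | nil => rfl
  | cons c rest ih =>
    have hne : ¬ ((i : Int) = s) := by simp at h ⊢; omega
    simp only [solutionGo, if_neg hne]
    rw [ih (i+1) (by simp at h ⊢; omega)]
    simp

-- overwrite mode: with s ≤ i and j < |ow|, the loop emits ow from j, then the tail of cs
theorem go_over (ow : List Char) (cs : List Char) (i : Nat) (s : Int) (j : Nat)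
    (hs : s ≤ (i : Int)) (hj : j < ow.length) :
    solutionGo ow ow.length cs i s 1 j
      = (ow.drop j).take cs.length ++ cs.drop (ow.length - j) := by
  induction cs generalizing i j with
  | nil => simp [solutionGo]
  | cons c rest ih =>
    have hone : (if (i : Int) = s then 1 else 1) = (1 : Nat) := ite_self 1
    have hnz : ¬ ((1 : Nat) = 0) := one_ne_zero
    have hdropj : ow.drop j = ow[j] :: ow.drop (j+1) := List.drop_eq_getElem_cons hj
    simp only [solutionGo, hone, if_neg hnz]
    by_cases hjn : j + 1 = ow.length
    · rw [if_pos hjn, go_copy _ _ _ _ _ _ (by left; push_cast; omega)]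
      have h1 : ow.length - j = 1 := by omega
      have h2 : ow.drop (j+1) = [] := List.drop_eq_nil_of_le (by omega)
      rw [hdropj, h2, h1]
      simp [List.getElem?_eq_getElem hj]
    · rw [if_neg hjn, ih (i+1) (j+1) (by push_cast; omega) (by omega)]
      have h1 : ow.length - j = (ow.length - (j+1)) + 1 := by omega
      rw [hdropj, h1, List.drop_succ_cons]
      simp [List.getElem?_eq_getElem hj]
      rw [hdropj, List.take_succ_cons]; simp

-- entering overwrite mode at i = s is the same step whether m is already 1 or not
theorem go_enter (ow : List Char) (n : Nat) (cs : List Char) (i : Nat) (s : Int) (j : Nat)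
    (h : (i : Int) = s) :
    solutionGo ow n cs i s 0 j = solutionGo ow n cs i s 1 j := by
  cases cs with
  | nil => rfl
  | cons c rest => simp [solutionGo, h]

-- start in copy mode with j = 0 and i ≤ s < i + |cs|: closed form of the whole run
theorem go_start (ow : List Char) (cs : List Char) (i : Nat) (s : Int)
    (hi : (i : Int) ≤ s) (hs : s < (i : Int) + cs.length) (hn : ow ≠ []) :
    solutionGo ow ow.length cs i s 0 0
      = cs.take (s - i).toNat ++ ow.take (cs.length - (s - i).toNat)
          ++ cs.drop ((s - i).toNat + ow.length) := by
  induction cs generalizing i with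
  | nil => simp at hs; omega
  | cons c rest ih =>
    by_cases heq : (i : Int) = s
    · rw [go_enter _ _ _ _ _ _ heq,
        go_over ow (c :: rest) i s 0 (le_of_eq heq.symm) (by cases ow <;> simp_all)]
      have h0 : (s - i).toNat = 0 := by omega
      simp [h0]
    · simp only [solutionGo, if_neg heq]
      rw [ih (i+1) (by push_cast; omega) (by push_cast at hs ⊢; simp at hs ⊢; omega)]
      have hd : (s - i).toNat = (s - (i+1)).toNat + 1 := by omega
      have hdrop : (c :: rest).drop ((s - (i+1)).toNat + 1 + ow.length)
          = rest.drop ((s - (i+1)).toNat + ow.length) := by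
        rw [show (s - ((i : Int)+1)).toNat + 1 + ow.length
              = ((s - ((i : Int)+1)).toNat + ow.length) + 1 from by omega,
          List.drop_succ_cons]
      simp [hd, hdrop]

-- ===== VERDICT (by name: the statement is the Claim_ definition above) =====
theorem solution_spec : Claim_equal_solution := by
  intro ms ow s _ hpre
  unfold Pre_solution at hpre
  unfold Spec_solution solution solution_alt
  by_cases hrange : s < 0 ∨ (ms.toList.length : Int) ≤ s
  · rw [if_pos hrange, go_copy _ _ _ _ _ _ (by push_cast; omega), String.ofList_toList]
  · push_neg at hrange
    have hn : ow.toList ≠ [] := fun h => hpre ⟨hrange.1, by omega, h⟩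
    have hnl : 1 ≤ (ow.toList.length : Int) := by
      have := List.length_pos_of_ne_nil hn; omega
    rw [if_neg (by omega),
      go_start ow.toList ms.toList 0 s (by omega) (by push_cast; omega) hn]
    have htake : ow.toList.take (ms.toList.length - (s - (0:Nat)).toNat)
        = ow.toList.take ((min (s + ow.toList.length) ms.toList.length) - s).toNat := by
      rw [List.take_eq_take_iff]; omega
    have hdrop : ms.toList.drop ((s - (0:Nat)).toNat + ow.toList.length)
        = ms.toList.drop (min (s + ow.toList.length) ms.toList.length).toNat := by
      rw [List.drop_eq_drop_iff]; omega
    rw [htake, hdrop, show (s - ((0:Nat) : Int)).toNat = s.toNat from by omega]
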